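-- pv_equiv track=rewrite | github.com/paubt/ULL | aiBusq/algorithm.py | findPositionAfterNSteps
-- ===== SOURCE A (Python) =====
-- def findPositionAfterNSteps(genotype, nStepsToTake):
--     positionHeight, positionWidth = 0, 0
--     # if input is in undefined range it sets itself to list length
--     if nStepsToTake == 0 or nStepsToTake >= len(genotype):
--         nStepsToTake = len(genotype)
--     # repeat for the prior specified n steps
--     while nStepsToTake > 0:
--         # pop first item form the list and change the positions based on the direction
--         nextDirection = genotype.pop(0)
--         if nextDirection == "N":
--             positionHeight -= 1
--         if nextDirection == "S":
--             positionHeight += 1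
--         if nextDirection == "E":
--             positionWidth += 1
--         if nextDirection == "W":
--             positionWidth -= 1
--         nStepsToTake -= 1
--     return positionHeight, positionWidth
-- ===== SOURCE B (Python) =====
-- from collections import Counter
--
-- def findPositionAfterNSteps(genotype, nStepsToTake):
--     n = nStepsToTake
--     if n == 0 or n >= len(genotype):
--         n = len(genotype)
--     consumed = max(0, n)
--     c = Counter(genotype[:consumed])
--     del genotype[:consumed]
--     return c["S"] - c["N"], c["E"] - c["W"]
-- ===== Notes on version B (the rewrite author's own statement) =====
-- stated objective: faster
-- what changed: Replaces the per-element pop(0)-and-branch accumulation loop (quadratic due to pop(0) shifting the list) with a Counter over the consumed prefix plus one list-slice deletion, computing the result by count arithmetic c['S']-c['N'], c['E']-c['W'].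
import Mathlib
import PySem

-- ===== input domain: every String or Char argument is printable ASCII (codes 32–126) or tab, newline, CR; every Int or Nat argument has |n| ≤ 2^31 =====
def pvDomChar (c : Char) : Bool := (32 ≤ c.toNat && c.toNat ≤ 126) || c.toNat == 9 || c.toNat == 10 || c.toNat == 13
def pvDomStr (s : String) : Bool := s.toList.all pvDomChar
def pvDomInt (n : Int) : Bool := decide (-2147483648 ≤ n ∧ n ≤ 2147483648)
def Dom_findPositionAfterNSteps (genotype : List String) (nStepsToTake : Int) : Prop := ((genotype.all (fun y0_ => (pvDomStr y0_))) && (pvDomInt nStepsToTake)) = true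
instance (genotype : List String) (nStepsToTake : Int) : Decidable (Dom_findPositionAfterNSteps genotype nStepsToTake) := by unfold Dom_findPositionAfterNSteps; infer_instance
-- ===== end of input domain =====

-- B replaces A's pop(0)-and-branch accumulation loop with count arithmetic over the
-- consumed prefix (Counter); equivalence is about the RETURN value only (both Pythons
-- shorten `genotype` by the same consumed prefix in place).

-- ===== PORT A =====
-- the while loop: fuel = remaining nStepsToTake (>0 iterations); pop(0) takes the head.
-- The `[]` case with fuel left is unreachable from the entry (guard ensures fuel ≤ length).
def fpnLoopA : Nat → List String → Int → Int → Int × Int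
  | 0, _, h, w => (h, w)
  | _ + 1, [], h, w => (h, w)
  | k + 1, d :: rest, h, w =>
      let h := if d == "N" then h - 1 else h
      let h := if d == "S" then h + 1 else h
      let w := if d == "E" then w + 1 else w
      let w := if d == "W" then w - 1 else w
      fpnLoopA k rest h w

def findPositionAfterNSteps (genotype : List String) (nStepsToTake : Int) : List Int :=
  let n : Int :=
    if nStepsToTake == 0 || nStepsToTake ≥ (genotype.length : Int) then (genotype.length : Int)
    else nStepsToTake
  let r := fpnLoopA n.toNat genotype 0 0   -- while n > 0: runs n.toNat times (0 if n < 0)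
  [r.1, r.2]

-- ===== PORT B =====
def findPositionAfterNSteps_alt (genotype : List String) (nStepsToTake : Int) : List Int :=
  let n : Int :=
    if nStepsToTake == 0 || nStepsToTake ≥ (genotype.length : Int) then (genotype.length : Int)
    else nStepsToTake
  let consumed : Nat := (max 0 n).toNat
  let c := PySem.Dict.counter (genotype.take consumed)   -- Counter(genotype[:consumed])
  [c.getD "S" 0 - c.getD "N" 0, c.getD "E" 0 - c.getD "W" 0]

-- ===== PRECONDITION & SPEC =====
def Spec_findPositionAfterNSteps (genotype : List String) (nStepsToTake : Int) (out : List Int) : Prop := out = findPositionAfterNSteps_alt genotype nStepsToTake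
instance (genotype : List String) (nStepsToTake : Int) (out : List Int) : Decidable (Spec_findPositionAfterNSteps genotype nStepsToTake out) := by unfold Spec_findPositionAfterNSteps; infer_instance

-- ===== CLAIM (what is proved, stated in full; the proofs are below) =====
def Claim_equal_findPositionAfterNSteps : Prop := ∀ (genotype : List String) (nStepsToTake : Int), Dom_findPositionAfterNSteps genotype nStepsToTake → Spec_findPositionAfterNSteps genotype nStepsToTake (findPositionAfterNSteps genotype nStepsToTake)

-- ===== LEMMAS AND PROOFS =====
theorem fpnLoopA_eq_counts (k : Nat) (g : List String) (h w : Int) :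
    fpnLoopA k g h w =
      (h + ((g.take k).count "S" : Int) - ((g.take k).count "N" : Int),
       w + ((g.take k).count "E" : Int) - ((g.take k).count "W" : Int)) := by
  induction k generalizing g h w with
  | zero => simp [fpnLoopA]
  | succ k ih =>
    cases g with
    | nil => simp [fpnLoopA]
    | cons d rest =>
      simp only [fpnLoopA, ih, List.take_succ_cons, List.count_cons]
      have hInt : ∀ (b : Bool) (x : Int) (y : Nat),
          x + (((y + if b = true then 1 else 0) : Nat) : Int)
          = x + (y : Int) + (if b = true then (1:Int) else 0) := by
        intro b x y; cases b <;> push_cast <;> ring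
      refine Prod.ext ?_ ?_ <;> simp only [hInt] <;> split_ifs <;> simp_all <;> omega

theorem findPositionAfterNSteps_spec : Claim_equal_findPositionAfterNSteps := by
  intro genotype nStepsToTake _
  show _ = _
  unfold findPositionAfterNSteps findPositionAfterNSteps_alt
  simp only [fpnLoopA_eq_counts, PySem.Dict.getD_counter]
  have htn : ∀ m : Int, (max 0 m).toNat = m.toNat := by intro m; omega
  simp [htn]
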